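-- pv_equiv track=rewrite | github.com/Sinabro-DSM/algorithm-study | 이규준/19.01.08_코드.py | solution
-- ===== SOURCE A (Python) =====
-- def solution(clothes):
--     answer = 1
--     dic = {}
--
--     for key, val in clothes:
--         dic[val] = dic.get(val, 0) + 1
--
--     for i in dic.values():
--         answer *= (i+1)
--
--     return answer - 1
-- ===== SOURCE B (Python) =====
-- def solution(clothes):
--     cats = [val for _, val in clothes]
--     answer = 1
--     while cats:
--         c = cats[0]
--         answer *= cats.count(c) + 1
--         cats = [x for x in cats if x != c]
--     return answer - 1
-- ===== Notes on version B (the rewrite author's own statement) =====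
-- stated objective: alternative
-- what changed: Replaces the dict-based frequency count with a recursive peel-off pass: repeatedly take the first remaining category, count its occurrences, multiply the answer by count+1, and filter that category out of the list.
import Mathlib
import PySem

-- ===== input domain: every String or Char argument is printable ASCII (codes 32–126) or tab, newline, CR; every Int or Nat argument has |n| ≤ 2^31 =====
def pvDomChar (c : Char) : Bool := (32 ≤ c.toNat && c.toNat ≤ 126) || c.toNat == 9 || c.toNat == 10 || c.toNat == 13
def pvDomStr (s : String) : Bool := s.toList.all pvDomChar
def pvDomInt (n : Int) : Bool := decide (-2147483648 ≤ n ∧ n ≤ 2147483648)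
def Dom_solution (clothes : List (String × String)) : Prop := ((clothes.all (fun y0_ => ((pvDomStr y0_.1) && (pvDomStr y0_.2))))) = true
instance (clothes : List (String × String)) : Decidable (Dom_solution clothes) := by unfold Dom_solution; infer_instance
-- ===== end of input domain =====

-- B replaces the dict-based counting with a recursive peel-off over the category list (alternative decomposition, same results).

-- ===== PORT A =====
def solution (clothes : List (String × String)) : Int :=
  let dic := clothes.foldl (fun d p => d.insert p.2 (d.getD p.2 0 + 1)) (PySem.Dict.empty : PySem.Dict String Int)
  let answer := dic.values.foldl (fun a i => a * (i + 1)) 1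
  answer - 1

-- ===== PORT B =====
-- 'while cats: c = cats[0]; answer *= cats.count(c)+1; cats = [x for x in cats if x != c]'
def solutionAltGo : List String → Int
  | [] => 1
  | c :: t => (((c :: t).count c : Int) + 1) * solutionAltGo ((c :: t).filter (· != c))
termination_by l => l.length
decreasing_by
  simp
  exact List.length_filter_le _ t

def solution_alt (clothes : List (String × String)) : Int :=
  solutionAltGo (clothes.map (fun p => p.2)) - 1

-- ===== PRECONDITION & SPEC =====
def Spec_solution (clothes : List (String × String)) (out : Int) : Prop := out = solution_alt clothes
instance (clothes : List (String × String)) (out : Int) : Decidable (Spec_solution clothes out) := by unfold Spec_solution; infer_instance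

-- ===== CLAIM (what is proved, stated in full; the proofs are below) =====
def Claim_equal_solution : Prop := ∀ (clothes : List (String × String)), Dom_solution clothes → Spec_solution clothes (solution clothes)

-- ===== LEMMAS AND PROOFS =====

theorem foldl_mul_succ (l : List Int) (a : Int) :
    l.foldl (fun acc i => acc * (i + 1)) a = a * (l.map (· + 1)).prod := by
  induction l generalizing a with
  | nil => simp
  | cons x t ih => simp [ih, mul_assoc]

theorem prod_map_nodup {α β : Type} [DecidableEq α] [CommMonoid β]
    (l : List α) (hl : l.Nodup) (f : α → β) :
    (l.map f).prod = ∏ k ∈ l.toFinset, f k := by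
  rw [List.prod_toFinset f hl]

theorem altGo_eq_prod (cats : List String) :
    solutionAltGo cats = ∏ k ∈ cats.toFinset, ((cats.count k : Int) + 1) := by
  induction hn : cats.length using Nat.strong_induction_on generalizing cats with
  | _ n ih =>
    match cats with
    | [] => rw [solutionAltGo.eq_def]; simp
    | c :: t =>
      rw [solutionAltGo.eq_def]
      dsimp only
      have hfl : (c :: t).filter (· != c) = t.filter (· != c) := by
        simp
      have hlen : (t.filter (· != c)).length < n := by
        subst hn
        exact Nat.lt_succ_of_le (List.length_filter_le _ t)
      rw [hfl, ih _ hlen _ rfl]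
      have hmemc : c ∈ (c :: t).toFinset := by simp
      rw [← Finset.mul_prod_erase _ _ hmemc]
      congr 1
      have hset : (t.filter (· != c)).toFinset = ((c :: t).toFinset).erase c := by
        ext k
        simp only [List.mem_toFinset, Finset.mem_erase, List.mem_filter, List.mem_cons,
          bne_iff_ne, ne_eq]
        tauto
      rw [hset]
      refine Finset.prod_congr rfl ?_
      intro k hk
      have hkc : k ≠ c := (Finset.mem_erase.mp hk).1
      have h1 : (t.filter (· != c)).count k = t.count k := by
        apply List.count_filter
        simp [hkc]
      have h2 : (c :: t).count k = t.count k := by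
        simp [Ne.symm hkc]
      rw [h1, h2]

theorem counter_values_prod (cats : List String) :
    ((PySem.Dict.counter cats).values.map (fun i => i + 1)).prod
      = ∏ k ∈ cats.toFinset, ((cats.count k : Int) + 1) := by
  have hitems := PySem.Dict.items_counter (xs := cats)
  have hvals : (PySem.Dict.counter cats).values
      = (PySem.Set.ofList cats).map (fun k => (cats.count k : Int)) := by
    simp only [PySem.Dict.values, hitems, List.map_map]
    rfl
  rw [hvals, List.map_map]
  have hnd : (PySem.Set.ofList cats).Nodup := PySem.Set.nodup_ofList cats
  rw [prod_map_nodup _ hnd]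
  apply Finset.prod_congr
  · ext k
    simp [PySem.Set.mem_ofList]
  · intro k _
    rfl

-- ===== VERDICT (by name: the statement is the Claim_ definition above) =====
theorem solution_spec : Claim_equal_solution := by
  intro clothes _
  unfold Spec_solution solution solution_alt
  have hd : clothes.foldl (fun d p => d.insert p.2 (d.getD p.2 0 + 1))
        (PySem.Dict.empty : PySem.Dict String Int)
      = PySem.Dict.counter (clothes.map (fun p => p.2)) := by
    rw [← PySem.Dict.foldl_insert_getD_add_one_eq_counter, List.foldl_map]
  simp only [hd, foldl_mul_succ, one_mul]
  rw [counter_values_prod, altGo_eq_prod]
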